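-- pv_equiv track=rewrite | github.com/danoscarmike/flash-math-fun | server/play/app/services/questions.py | get_max_valid_questions
-- ===== SOURCE A (Python) =====
-- from typing import List, Optional, Tuple
--
-- def get_max_valid_questions(operations: List[str], selected_numbers: List[int]):
--     """Calculate maximum possible unique questions for selected numbers and operations"""
--     if not selected_numbers:
--         return 0
--
--     if not operations:
--         return len(selected_numbers) * 12
--
--     max_valid_questions = 0
--     for first in selected_numbers:
--         for second in range(1, 13):  # 1 to 12
--             for operation in operations:
--                 if operation == "Addition":
--                     max_valid_questions += 1
--                 elif operation == "Subtraction":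
--                     max_valid_questions += 1
--                 elif operation == "Multiplication":
--                     max_valid_questions += 1
--                 elif operation == "Division":
--                     # Only allow division if the result is an integer
--                     if (second != 0 and first % second == 0) or (
--                         first != 0 and second % first == 0
--                     ):
--                         max_valid_questions += 1
--
--     return max_valid_questions
-- ===== SOURCE B (Python) =====
-- def get_max_valid_questions(operations, selected_numbers):
--     """Calculate maximum possible unique questions for selected numbers and operations"""
--     if not selected_numbers:
--         return 0
--     if not operations:
--         return len(selected_numbers) * 12
--     non_div = sum(1 for op in operations
--                   if op in ("Addition", "Subtraction", "Multiplication"))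
--     div = operations.count("Division")
--     total = len(selected_numbers) * 12 * non_div
--     for first in selected_numbers:
--         total += div * sum(1 for second in range(1, 13)
--                            if first % second == 0
--                            or (first != 0 and second % first == 0))
--     return total
-- ===== Notes on version B (the rewrite author's own statement) =====
-- stated objective: faster
-- what changed: Replaces A's triple nested loop over (first, second, operation) with precomputed operation counts: non-division operations contribute a closed-form len*12*non_div, and division contributes div times a per-first count of valid divisors in 1..12.
import Mathlib
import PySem

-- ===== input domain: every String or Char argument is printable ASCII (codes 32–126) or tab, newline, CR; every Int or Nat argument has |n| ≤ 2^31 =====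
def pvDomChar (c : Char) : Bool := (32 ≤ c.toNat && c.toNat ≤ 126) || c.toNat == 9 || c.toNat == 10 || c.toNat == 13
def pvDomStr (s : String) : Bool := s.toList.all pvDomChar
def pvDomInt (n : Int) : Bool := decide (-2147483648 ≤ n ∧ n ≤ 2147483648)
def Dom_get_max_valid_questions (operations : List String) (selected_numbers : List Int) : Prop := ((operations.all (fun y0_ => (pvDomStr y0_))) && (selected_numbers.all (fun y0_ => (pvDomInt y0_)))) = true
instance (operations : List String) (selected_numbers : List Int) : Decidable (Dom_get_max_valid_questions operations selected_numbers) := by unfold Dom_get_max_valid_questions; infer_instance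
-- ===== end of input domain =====

-- B replaces A's triple nested loop by precomputed operation counts (closed-form
-- contribution for non-division operations, per-number divisor count for division): simpler.

-- ===== PORT A =====
def get_max_valid_questions (operations : List String) (selected_numbers : List Int) : Int :=
  if selected_numbers = [] then 0
  else if operations = [] then (selected_numbers.length : Int) * 12
  else
    selected_numbers.foldl (fun acc1 first =>
      (PySem.List.pyRange 1 13 1).foldl (fun acc2 second =>
        operations.foldl (fun acc3 operation =>
          if operation = "Addition" then acc3 + 1
          else if operation = "Subtraction" then acc3 + 1
          else if operation = "Multiplication" then acc3 + 1
          else if operation = "Division" then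
            if (second ≠ 0 ∧ PySem.Int.mod first second = 0) ∨
               (first ≠ 0 ∧ PySem.Int.mod second first = 0) then acc3 + 1 else acc3
          else acc3) acc2) acc1) 0

-- ===== PORT B =====
def get_max_valid_questions_alt (operations : List String) (selected_numbers : List Int) : Int :=
  if selected_numbers = [] then 0
  else if operations = [] then (selected_numbers.length : Int) * 12
  else
    let nonDiv : Int :=
      ((operations.countP (fun op =>
        op == "Addition" || op == "Subtraction" || op == "Multiplication")) : Nat)
    let div : Int := (PySem.List.count operations "Division" : Nat)
    selected_numbers.foldl (fun total first =>
      total + div * (((PySem.List.pyRange 1 13 1).countP (fun second =>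
        PySem.Int.mod first second == 0 ||
        (first != 0 && PySem.Int.mod second first == 0))) : Nat))
      ((selected_numbers.length : Int) * 12 * nonDiv)

-- ===== PRECONDITION & SPEC =====
def Spec_get_max_valid_questions (operations : List String) (selected_numbers : List Int) (out : Int) : Prop := out = get_max_valid_questions_alt operations selected_numbers
instance (operations : List String) (selected_numbers : List Int) (out : Int) : Decidable (Spec_get_max_valid_questions operations selected_numbers out) := by unfold Spec_get_max_valid_questions; infer_instance

-- ===== CLAIM (what is proved, stated in full; the proofs are below) =====
def Claim_equal_get_max_valid_questions : Prop := ∀ (operations : List String) (selected_numbers : List Int), Dom_get_max_valid_questions operations selected_numbers → Spec_get_max_valid_questions operations selected_numbers (get_max_valid_questions operations selected_numbers)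

-- ===== LEMMAS AND PROOFS =====

-- per-(first, second) contribution of the operations loop
theorem pv_inner_ops (operations : List String) (first second acc : Int) :
    operations.foldl (fun acc3 operation =>
      if operation = "Addition" then acc3 + 1
      else if operation = "Subtraction" then acc3 + 1
      else if operation = "Multiplication" then acc3 + 1
      else if operation = "Division" then
        if (second ≠ 0 ∧ PySem.Int.mod first second = 0) ∨
           (first ≠ 0 ∧ PySem.Int.mod second first = 0) then acc3 + 1 else acc3
      else acc3) acc
    = acc + ((operations.countP (fun op =>
        op == "Addition" || op == "Subtraction" || op == "Multiplication")) : Nat)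
        + (if (second ≠ 0 ∧ PySem.Int.mod first second = 0) ∨
              (first ≠ 0 ∧ PySem.Int.mod second first = 0)
           then ((PySem.List.count operations "Division" : Nat) : Int) else 0) := by
  induction operations generalizing acc with
  | nil => simp [PySem.List.count]
  | cons op rest ih =>
    simp only [List.foldl_cons, ih, List.countP_cons, PySem.List.count, List.count_cons]
    by_cases h1 : op = "Addition" <;> by_cases h2 : op = "Subtraction" <;>
      by_cases h3 : op = "Multiplication" <;> by_cases h4 : op = "Division" <;>
      simp [h1, h2, h3, h4] <;> (try split_ifs) <;> omega

-- per-first contribution of the seconds loop, for any list of nonzero seconds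
theorem pv_inner_seconds (L : List Int) (hL : ∀ s ∈ L, s ≠ 0)
    (operations : List String) (first acc : Int) :
    L.foldl (fun acc2 second =>
      operations.foldl (fun acc3 operation =>
        if operation = "Addition" then acc3 + 1
        else if operation = "Subtraction" then acc3 + 1
        else if operation = "Multiplication" then acc3 + 1
        else if operation = "Division" then
          if (second ≠ 0 ∧ PySem.Int.mod first second = 0) ∨
             (first ≠ 0 ∧ PySem.Int.mod second first = 0) then acc3 + 1 else acc3
        else acc3) acc2) acc
    = acc + (L.length : Int) * ((operations.countP (fun op =>
        op == "Addition" || op == "Subtraction" || op == "Multiplication")) : Nat)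
        + ((PySem.List.count operations "Division" : Nat) : Int)
          * ((L.countP (fun second =>
              PySem.Int.mod first second == 0 ||
              (first != 0 && PySem.Int.mod second first == 0))) : Nat) := by
  induction L generalizing acc with
  | nil => simp
  | cons s rest ih =>
    have hs : s ≠ 0 := hL s (by simp)
    have hcond : ((s ≠ 0 ∧ PySem.Int.mod first s = 0) ∨ (first ≠ 0 ∧ PySem.Int.mod s first = 0))
        ↔ (PySem.Int.mod first s == 0 || (first != 0 && PySem.Int.mod s first == 0)) = true := by
      simp [hs]
    rw [List.foldl_cons, pv_inner_ops, ih (fun x hx => hL x (List.mem_cons_of_mem _ hx)),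
        List.countP_cons]
    by_cases hc : (PySem.Int.mod first s == 0 || (first != 0 && PySem.Int.mod s first == 0)) = true
    · rw [if_pos (hcond.mpr hc)]; simp only [hc, if_true, List.length_cons]; push_cast; ring
    · rw [if_neg (fun h => hc (hcond.mp h))]; simp only [hc, List.length_cons]
      push_cast; ring

-- the outer loop over selected numbers
theorem pv_outer (selected_numbers : List Int) (operations : List String) (acc : Int) :
    selected_numbers.foldl (fun acc1 first =>
      (PySem.List.pyRange 1 13 1).foldl (fun acc2 second =>
        operations.foldl (fun acc3 operation =>
          if operation = "Addition" then acc3 + 1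
          else if operation = "Subtraction" then acc3 + 1
          else if operation = "Multiplication" then acc3 + 1
          else if operation = "Division" then
            if (second ≠ 0 ∧ PySem.Int.mod first second = 0) ∨
               (first ≠ 0 ∧ PySem.Int.mod second first = 0) then acc3 + 1 else acc3
          else acc3) acc2) acc1) acc
    = selected_numbers.foldl (fun total first =>
        total + ((PySem.List.count operations "Division" : Nat) : Int)
          * (((PySem.List.pyRange 1 13 1).countP (fun second =>
              PySem.Int.mod first second == 0 ||
              (first != 0 && PySem.Int.mod second first == 0))) : Nat))
        (acc + (selected_numbers.length : Int) * 12 * ((operations.countP (fun op =>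
          op == "Addition" || op == "Subtraction" || op == "Multiplication")) : Nat)) := by
  induction selected_numbers generalizing acc with
  | nil => simp
  | cons f rest ih =>
    have hnz : ∀ s ∈ PySem.List.pyRange 1 13 1, s ≠ 0 := by decide
    have hlen : ((PySem.List.pyRange 1 13 1).length : Int) = 12 := by decide
    rw [List.foldl_cons, List.foldl_cons, pv_inner_seconds _ hnz, hlen, ih]
    congr 1
    simp only [List.length_cons]
    push_cast
    ring

-- ===== VERDICT (by name: the statement is the Claim_ definition above) =====
theorem get_max_valid_questions_spec : Claim_equal_get_max_valid_questions := by
  intro operations selected_numbers _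
  unfold Spec_get_max_valid_questions get_max_valid_questions get_max_valid_questions_alt
  by_cases h1 : selected_numbers = []
  · simp [h1]
  · by_cases h2 : operations = []
    · simp [h1, h2]
    · simp only [h1, h2, if_false]
      rw [pv_outer]
      ring_nf
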